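-- pv_equiv track=rewrite | github.com/holman57/Python | matrixElementsSum/main.py | solution
-- ===== SOURCE A (Python) =====
-- def solution(matrix):
--     n = len(matrix)
--     m = len(matrix[0])
--
--     dp = [1] * m
--     r = 0
--
--     for j in range(m):
--         for i in range(n):
--             if matrix[i][j] == 0:
--                 dp[j] = 0
--             if dp[j] == 1:
--                 r += matrix[i][j]
--
--     return r
-- ===== SOURCE B (Python) =====
-- def solution(matrix):
--     alive = list(range(len(matrix[0])))
--     r = 0
--     for row in matrix:
--         alive = [j for j in alive if row[j] != 0]
--         r += sum(row[j] for j in alive)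
--     return r
-- ===== Notes on version B (the rewrite author's own statement) =====
-- stated objective: alternative
-- what changed: Traverses the matrix row-major in a single pass over rows, maintaining a shrinking list of still-alive column indices (a column is dropped the moment a zero appears), instead of A's column-major double loop with a dp flag array.
import Mathlib
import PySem

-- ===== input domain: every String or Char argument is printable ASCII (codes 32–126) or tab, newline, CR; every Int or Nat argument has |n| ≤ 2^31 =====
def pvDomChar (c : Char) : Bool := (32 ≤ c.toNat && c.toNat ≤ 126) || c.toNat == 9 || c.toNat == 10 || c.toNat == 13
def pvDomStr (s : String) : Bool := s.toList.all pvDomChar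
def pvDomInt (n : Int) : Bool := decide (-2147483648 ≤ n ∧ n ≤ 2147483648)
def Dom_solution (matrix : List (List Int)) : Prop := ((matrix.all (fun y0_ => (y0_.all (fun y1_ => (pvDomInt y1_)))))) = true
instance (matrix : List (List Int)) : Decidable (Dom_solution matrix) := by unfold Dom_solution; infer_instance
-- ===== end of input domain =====

-- B traverses the matrix row-major in one pass, keeping a shrinking list of alive column
-- indices, instead of A's column-major double loop with a dp flag array (alternative).

-- ===== PORT A =====
def solution (matrix : List (List Int)) : Int :=
  let n : Int := (matrix.length : Int)
  let m : Int := ((PySem.List.pyGetD matrix 0 []).length : Int)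
  let dp : List Int := List.replicate m.toNat 1
  let st :=
    (PySem.List.pyRange 0 m 1).foldl (fun (st : List Int × Int) j =>
      (PySem.List.pyRange 0 n 1).foldl (fun (st : List Int × Int) i =>
        let row := PySem.List.pyGetD matrix i []
        let dp := if PySem.List.pyGetD row j 0 = 0 then PySem.List.pySetD st.1 j 0 else st.1
        let r := if PySem.List.pyGetD dp j 0 = 1 then st.2 + PySem.List.pyGetD row j 0 else st.2
        (dp, r)) st) (dp, (0 : Int))
  st.2

-- ===== PORT B =====
def solution_alt (matrix : List (List Int)) : Int :=
  let alive0 : List Int := PySem.List.pyRange 0 ((PySem.List.pyGetD matrix 0 []).length : Int) 1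
  let st := matrix.foldl (fun (st : List Int × Int) row =>
      let alive := st.1.filter (fun j => !(PySem.List.pyGetD row j 0 == 0))
      (alive, st.2 + (alive.map (fun j => PySem.List.pyGetD row j 0)).sum))
    (alive0, (0 : Int))
  st.2

-- ===== PRECONDITION & SPEC =====
-- Pre_ excludes exactly the inputs where Python A raises IndexError: the empty matrix
-- (matrix[0]) and ragged matrices with some row shorter than the first row (matrix[i][j]).
def Pre_solution (matrix : List (List Int)) : Prop :=
  matrix ≠ [] ∧ ∀ row ∈ matrix, (matrix.headD []).length ≤ row.length

instance (matrix : List (List Int)) : Decidable (Pre_solution matrix) := by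
  unfold Pre_solution; infer_instance

def pvWitness_solution : List (List Int) := [[1, 2], [0, 3]]

def Spec_solution (matrix : List (List Int)) (out : Int) : Prop := out = solution_alt matrix
instance (matrix : List (List Int)) (out : Int) : Decidable (Spec_solution matrix out) := by
  unfold Spec_solution; infer_instance

-- ===== CLAIM (what is proved, stated in full; the proofs are below) =====
def Claim_equal_solution : Prop :=
  ∀ (matrix : List (List Int)), Dom_solution matrix → Pre_solution matrix →
    Spec_solution matrix (solution matrix)

-- ===== LEMMAS AND PROOFS =====

-- Proof-side characterisation: sum of column j down to (excluding) its first zero.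
def column_sum (matrix : List (List Int)) (j : Int) : Int :=
  match matrix with
  | [] => 0
  | row :: rest =>
    if PySem.List.pyGetD row j 0 = 0 then 0
    else PySem.List.pyGetD row j 0 + column_sum rest j

-- Column-j body of A's inner loop, after the row-index fold is bridged to a structural fold.
def pvStep (j : Int) (st : List Int × Int) (row : List Int) : List Int × Int :=
  let dp := if PySem.List.pyGetD row j 0 = 0 then PySem.List.pySetD st.1 j 0 else st.1
  (dp, if PySem.List.pyGetD dp j 0 = 1 then st.2 + PySem.List.pyGetD row j 0 else st.2)

-- Once dp[j] ≠ 1 the inner loop adds nothing more, and entries other than j are untouched.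
theorem pvInner_dead (jn : Nat) :
    ∀ (rows : List (List Int)) (dp : List Int) (r : Int),
      jn < dp.length → PySem.List.pyGetD dp (jn : Int) 0 ≠ 1 →
      ∃ dp', rows.foldl (pvStep (jn : Int)) (dp, r) = (dp', r) ∧ dp'.length = dp.length ∧
        ∀ jn' : Nat, jn' ≠ jn →
          PySem.List.pyGetD dp' (jn' : Int) 0 = PySem.List.pyGetD dp (jn' : Int) 0 := by
  intro rows
  induction rows with
  | nil => intro dp r _ _; exact ⟨dp, rfl, rfl, fun _ _ => rfl⟩
  | cons row rest ih =>
    intro dp r hlen hdp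
    by_cases hz : PySem.List.pyGetD row (jn : Int) 0 = 0
    · have hset : PySem.List.pyGetD (PySem.List.pySetD dp (jn : Int) 0) (jn : Int) 0 = 0 := by
        rw [PySem.List.pyGetD_pySetD_natCast dp jn jn 0 0 hlen]; simp
      have hstep : pvStep (jn : Int) (dp, r) row = (PySem.List.pySetD dp (jn : Int) 0, r) := by
        simp only [pvStep]
        rw [if_pos hz, hset, if_neg (by decide : ¬ (0:Int) = 1)]
      obtain ⟨dp', h1, h2, h3⟩ := ih (PySem.List.pySetD dp (jn : Int) 0) r
        (by rw [PySem.List.length_pySetD]; exact hlen) (by rw [hset]; decide)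
      refine ⟨dp', by simpa [hstep] using h1, by rw [h2, PySem.List.length_pySetD], ?_⟩
      intro jn' hne
      rw [h3 jn' hne, PySem.List.pyGetD_pySetD_natCast dp jn jn' 0 0 hlen, if_neg hne]
    · have hstep : pvStep (jn : Int) (dp, r) row = (dp, r) := by
        simp only [pvStep]
        rw [if_neg hz, if_neg hdp]
      obtain ⟨dp', h1, h2, h3⟩ := ih dp r hlen hdp
      exact ⟨dp', by simpa [hstep] using h1, h2, h3⟩

-- While dp[j] = 1, the inner loop adds exactly column_sum and touches only entry j.
theorem pvInner_live (jn : Nat) :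
    ∀ (rows : List (List Int)) (dp : List Int) (r : Int),
      jn < dp.length → PySem.List.pyGetD dp (jn : Int) 0 = 1 →
      ∃ dp', rows.foldl (pvStep (jn : Int)) (dp, r) = (dp', r + column_sum rows (jn : Int)) ∧
        dp'.length = dp.length ∧
        ∀ jn' : Nat, jn' ≠ jn →
          PySem.List.pyGetD dp' (jn' : Int) 0 = PySem.List.pyGetD dp (jn' : Int) 0 := by
  intro rows
  induction rows with
  | nil => intro dp r _ _; exact ⟨dp, by simp [column_sum], rfl, fun _ _ => rfl⟩
  | cons row rest ih =>
    intro dp r hlen hdp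
    by_cases hz : PySem.List.pyGetD row (jn : Int) 0 = 0
    · have hset : PySem.List.pyGetD (PySem.List.pySetD dp (jn : Int) 0) (jn : Int) 0 = 0 := by
        rw [PySem.List.pyGetD_pySetD_natCast dp jn jn 0 0 hlen]; simp
      have hstep : pvStep (jn : Int) (dp, r) row = (PySem.List.pySetD dp (jn : Int) 0, r) := by
        simp only [pvStep]
        rw [if_pos hz, hset, if_neg (by decide : ¬ (0:Int) = 1)]
      obtain ⟨dp', h1, h2, h3⟩ := pvInner_dead jn rest (PySem.List.pySetD dp (jn : Int) 0) r
        (by rw [PySem.List.length_pySetD]; exact hlen) (by rw [hset]; decide)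
      refine ⟨dp', ?_, by rw [h2, PySem.List.length_pySetD], ?_⟩
      · simp only [List.foldl_cons, hstep, h1, column_sum, hz, if_pos]
        simp
      · intro jn' hne
        rw [h3 jn' hne, PySem.List.pyGetD_pySetD_natCast dp jn jn' 0 0 hlen, if_neg hne]
    · have hstep : pvStep (jn : Int) (dp, r) row =
          (dp, r + PySem.List.pyGetD row (jn : Int) 0) := by
        simp only [pvStep]
        rw [if_neg hz, if_pos hdp]
      obtain ⟨dp', h1, h2, h3⟩ := ih dp (r + PySem.List.pyGetD row (jn : Int) 0) hlen hdp
      refine ⟨dp', ?_, h2, h3⟩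
      simp only [List.foldl_cons, hstep, h1, column_sum, hz, add_assoc]
      simp

-- A's outer loop over distinct live columns accumulates the per-column sums.
theorem pvOuter (matrix : List (List Int)) :
    ∀ (js : List Int) (dp : List Int) (r : Int),
      js.Pairwise (· ≠ ·) →
      (∀ j ∈ js, 0 ≤ j ∧ j < (dp.length : Int) ∧ PySem.List.pyGetD dp j 0 = 1) →
      (js.foldl (fun st j => matrix.foldl (pvStep j) st) (dp, r)).2
        = r + (js.map (column_sum matrix)).sum := by
  intro js
  induction js with
  | nil => intro dp r _ _; simp
  | cons j rest ih =>
    intro dp r hpw hyp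
    obtain ⟨hj0, hjlen, hdp⟩ := hyp j (List.mem_cons_self ..)
    obtain ⟨jn, rfl⟩ : ∃ jn : Nat, j = (jn : Int) := ⟨j.toNat, (Int.toNat_of_nonneg hj0).symm⟩
    have hjlen' : jn < dp.length := by exact_mod_cast hjlen
    obtain ⟨dp', h1, h2, h3⟩ := pvInner_live jn matrix dp r hjlen' hdp
    have hrest : ∀ j' ∈ rest, 0 ≤ j' ∧ j' < (dp'.length : Int) ∧ PySem.List.pyGetD dp' j' 0 = 1 := by
      intro j' hj'
      obtain ⟨h0', hlen', hdp''⟩ := hyp j' (List.mem_cons_of_mem _ hj')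
      obtain ⟨jn', rfl⟩ : ∃ k : Nat, j' = (k : Int) := ⟨j'.toNat, (Int.toNat_of_nonneg h0').symm⟩
      have hne : jn' ≠ jn := by
        intro h
        exact (List.rel_of_pairwise_cons hpw hj') (by exact_mod_cast h.symm)
      exact ⟨h0', by rw [h2]; exact hlen', by rw [h3 jn' hne]; exact hdp''⟩
    calc (List.foldl (fun st j => matrix.foldl (pvStep j) st) (dp, r) ((jn : Int) :: rest)).2
        = (List.foldl (fun st j => matrix.foldl (pvStep j) st)
            (dp', r + column_sum matrix (jn : Int)) rest).2 := by rw [List.foldl_cons, h1]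
      _ = r + column_sum matrix (jn : Int) + (rest.map (column_sum matrix)).sum :=
          ih dp' _ hpw.of_cons hrest
      _ = r + ((((jn : Int) :: rest)).map (column_sum matrix)).sum := by
          rw [List.map_cons, List.sum_cons]; ring

-- A equals the sum, over the column range, of the per-column prefix sums.
theorem pvMainA (matrix : List (List Int)) :
    solution matrix
      = ((PySem.List.pyRange 0 ((PySem.List.pyGetD matrix 0 []).length : Int) 1).map
          (column_sum matrix)).sum := by
  have hF : (fun (st : List Int × Int) (j : Int) =>
      (PySem.List.pyRange 0 (matrix.length : Int) 1).foldl (fun (st : List Int × Int) i =>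
        let row := PySem.List.pyGetD matrix i []
        let dp := if PySem.List.pyGetD row j 0 = 0 then PySem.List.pySetD st.1 j 0 else st.1
        let r := if PySem.List.pyGetD dp j 0 = 1 then st.2 + PySem.List.pyGetD row j 0 else st.2
        (dp, r)) st)
      = (fun (st : List Int × Int) (j : Int) => matrix.foldl (pvStep j) st) := by
    funext st j
    exact PySem.List.foldl_pyRange_zero_pyGetD' matrix [] (pvStep j) st
  simp only [solution]
  rw [hF]
  set m : Int := ((PySem.List.pyGetD matrix 0 []).length : Int) with hm
  have h0m : 0 ≤ m := by positivity
  rw [pvOuter matrix (PySem.List.pyRange 0 m 1) (List.replicate m.toNat 1) 0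
    ((PySem.List.pairwise_lt_pyRange_one 0 m).imp ne_of_lt) ?_]
  · exact zero_add _
  · intro j hj
    obtain ⟨hj0, hjm⟩ := PySem.List.mem_pyRange_one.1 hj
    refine ⟨hj0, ?_, ?_⟩
    · simpa [Int.toNat_of_nonneg h0m] using hjm
    · obtain ⟨jn, rfl⟩ : ∃ k : Nat, j = (k : Int) := ⟨j.toNat, (Int.toNat_of_nonneg hj0).symm⟩
      rw [PySem.List.pyGetD_natCast]
      have : jn < m.toNat := by omega
      simp [List.getD, this]

-- Summing column_sum (row :: rest) over js drops zero cells and filters dead columns.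
theorem pvFilterSum (row : List Int) (rest : List (List Int)) :
    ∀ js : List Int,
      ((js.filter (fun j => !(PySem.List.pyGetD row j 0 == 0))).map
          (fun j => PySem.List.pyGetD row j 0 + column_sum rest j)).sum
        = (js.map (column_sum (row :: rest))).sum := by
  intro js
  induction js with
  | nil => simp
  | cons j tl ih =>
    by_cases hz : PySem.List.pyGetD row j 0 = 0
    · simp [hz, column_sum, ih]
    · simp [hz, column_sum, ih]

-- B's single row-major pass with a shrinking alive list accumulates the same sums.
theorem pvMainB_fold :
    ∀ (rows : List (List Int)) (js : List Int) (r : Int),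
      (rows.foldl (fun (st : List Int × Int) row =>
          let alive := st.1.filter (fun j => !(PySem.List.pyGetD row j 0 == 0))
          (alive, st.2 + (alive.map (fun j => PySem.List.pyGetD row j 0)).sum))
        (js, r)).2
      = r + (js.map (column_sum rows)).sum := by
  intro rows
  induction rows with
  | nil => intro js r; simp [column_sum]
  | cons row rest ih =>
    intro js r
    rw [List.foldl_cons]
    simp only []
    rw [ih]
    have hsplit := pvFilterSum row rest js
    have hadd : ((js.filter (fun j => !(PySem.List.pyGetD row j 0 == 0))).map
          (fun j => PySem.List.pyGetD row j 0 + column_sum rest j)).sum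
        = ((js.filter (fun j => !(PySem.List.pyGetD row j 0 == 0))).map
            (fun j => PySem.List.pyGetD row j 0)).sum
          + ((js.filter (fun j => !(PySem.List.pyGetD row j 0 == 0))).map
              (column_sum rest)).sum := by
      induction js.filter (fun j => !(PySem.List.pyGetD row j 0 == 0)) with
      | nil => simp
      | cons a tl ih2 => simp [ih2]; ring
    rw [hadd] at hsplit
    omega

theorem pvMain (matrix : List (List Int)) : solution matrix = solution_alt matrix := by
  rw [pvMainA]
  simp only [solution_alt]
  rw [pvMainB_fold matrix (PySem.List.pyRange 0 ((PySem.List.pyGetD matrix 0 []).length : Int) 1) 0]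
  exact (zero_add _).symm

-- ===== VERDICT (by name: the statement is the Claim_ definition above) =====
theorem solution_spec : Claim_equal_solution := by
  intro matrix _ _
  unfold Spec_solution
  exact pvMain matrix
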